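-- pv_equiv track=rewrite | github.com/benochi/pylc | pa/charge.py | get_maximum_charge
-- ===== SOURCE A (Python) =====
-- from typing import List
-- from functools import lru_cache
--
-- def get_maximum_charge(charge: List[int]) -> int:
--     # Convert list to tuple for hashable state in memoization
--     charges = tuple(charge)
--
--     @lru_cache(None)
--     def simulate(curr_charges: tuple) -> int:
--         if len(curr_charges) == 1:
--             return curr_charges[0]
--
--         max_charge = float('-inf')
--
--         # Try removing each system except first and last
--         for i in range(len(curr_charges)):
--             # Create new state after removal and combination
--             new_charges = list(curr_charges)
--
--             # If not leftmost or rightmost, combine neighbors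
--             if 0 < i < len(curr_charges) - 1:
--                 combined_charge = curr_charges[i-1] + curr_charges[i+1]
--                 new_charges = new_charges[:i-1] + [combined_charge] + new_charges[i+2:]
--             # If leftmost, just remove it
--             elif i == 0:
--                 new_charges = new_charges[1:]
--             # If rightmost, just remove it
--             else:
--                 new_charges = new_charges[:-1]
--
--             # Recursive call with new state
--             result = simulate(tuple(new_charges))
--             max_charge = max(max_charge, result)
--
--         return max_charge
--
--     return simulate(charges)
-- ===== SOURCE B (Python) =====
-- def get_maximum_charge(charge):
--     evens = [x for i, x in enumerate(charge) if i % 2 == 0]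
--     odds = [x for i, x in enumerate(charge) if i % 2 == 1]
--
--     def best(xs):
--         pos = sum(x for x in xs if x > 0)
--         return pos if pos > 0 else max(xs)
--
--     return best(evens) if not odds else max(best(evens), best(odds))
-- ===== Notes on version B (the rewrite author's own statement) =====
-- stated objective: faster
-- what changed: A recursively simulates every drop/merge move over memoized tuple states; B uses the closed characterisation that the reachable final values are exactly the sums of nonempty subsets of the even-indexed or of the odd-indexed elements, so it returns in one pass max over each parity class of (sum of its positive elements, or its maximum element if none is positive).
-- outside the precondition, e.g. on get_maximum_charge([]): A returns -inf, B raises ValueError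
import Mathlib
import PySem

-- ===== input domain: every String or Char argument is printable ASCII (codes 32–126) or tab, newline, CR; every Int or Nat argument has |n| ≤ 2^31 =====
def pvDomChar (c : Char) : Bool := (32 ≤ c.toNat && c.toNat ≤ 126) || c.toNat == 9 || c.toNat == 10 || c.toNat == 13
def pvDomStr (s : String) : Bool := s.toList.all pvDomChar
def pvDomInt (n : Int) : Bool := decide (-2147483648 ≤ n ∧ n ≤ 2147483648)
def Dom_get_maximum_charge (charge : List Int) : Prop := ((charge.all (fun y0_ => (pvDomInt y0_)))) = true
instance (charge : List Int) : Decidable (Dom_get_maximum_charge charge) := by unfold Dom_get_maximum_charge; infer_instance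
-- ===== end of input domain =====

-- B replaces A's exponential memoized search over whole list states by the closed
-- characterisation "max sum of a nonempty subset of the even- or odd-indexed elements",
-- computed in one pass (objective: faster).


-- ===== PORT A =====
-- Python's state after move i: slices new_charges[:i-1], [i+2:], [1:], [:-1] have
-- nonnegative in-range bounds here (i ≥ 1 in the first), exact as take/drop;
-- curr_charges[i-1] / curr_charges[i+1] are nonnegative in-range indices, exact as getElem?.getD.
def pvStep (l : List Int) (i : Nat) : List Int :=
  if 0 < i ∧ i < l.length - 1 then
    l.take (i-1) ++ (((l[i-1]?).getD 0) + ((l[i+1]?).getD 0)) :: l.drop (i+2)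
  else if i = 0 then l.drop 1
  else l.take (l.length - 1)

lemma pvStep_length_lt (l : List Int) (i : Nat) (h2 : 2 ≤ l.length) (hi : i < l.length) :
    (pvStep l i).length < l.length := by
  unfold pvStep; split_ifs <;> simp <;> omega

-- Python's running max starting from float('-inf'): none plays -inf.
def pvMaxFold (cs : List Int) : Option Int :=
  cs.foldl (fun acc r => some (acc.elim r (fun a => max a r))) none

def get_maximum_charge (charge : List Int) : Int :=
  if charge.length = 1 then (charge[0]?).getD 0
  else (pvMaxFold ((List.range charge.length).attach.map
        (fun x => get_maximum_charge (pvStep charge x.1)))).getD 0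
termination_by charge.length
decreasing_by
  have hx := List.mem_range.mp x.2
  exact pvStep_length_lt _ _ (by omega) hx

-- ===== PORT B =====
def pvBestB (xs : List Int) : Int :=
  let pos := (xs.filter (fun x => decide (0 < x))).sum
  if 0 < pos then pos else (PySem.List.max? xs (fun y => y)).getD 0

def get_maximum_charge_alt (charge : List Int) : Int :=
  let evens := ((PySem.List.enumerate charge 0).filter (fun p => PySem.Int.mod p.1 2 == 0)).map Prod.snd
  let odds := ((PySem.List.enumerate charge 0).filter (fun p => PySem.Int.mod p.1 2 == 1)).map Prod.snd
  if odds = [] then pvBestB evens else max (pvBestB evens) (pvBestB odds)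

-- ===== PRECONDITION & SPEC =====
-- Pre_ excludes the empty list, on which A returns float('-inf') — not an int — and B raises ValueError.
def Pre_get_maximum_charge (charge : List Int) : Prop := charge ≠ []
instance (charge : List Int) : Decidable (Pre_get_maximum_charge charge) := by
  unfold Pre_get_maximum_charge; infer_instance

def pvWitness_get_maximum_charge : List Int := [3, -1, 4]

def Spec_get_maximum_charge (charge : List Int) (out : Int) : Prop := out = get_maximum_charge_alt charge
instance (charge : List Int) (out : Int) : Decidable (Spec_get_maximum_charge charge out) := by
  unfold Spec_get_maximum_charge; infer_instance

-- ===== CLAIM (what is proved, stated in full; the proofs are below) =====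
def Claim_equal_get_maximum_charge : Prop := ∀ (charge : List Int), Dom_get_maximum_charge charge → Pre_get_maximum_charge charge → Spec_get_maximum_charge charge (get_maximum_charge charge)

-- ===== LEMMAS AND PROOFS =====

-- the even- and odd-position subsequences of a list
def pvEv : List Int → List Int
  | [] => []
  | [a] => [a]
  | a :: _ :: t => a :: pvEv t

def pvOd (l : List Int) : List Int := pvEv l.tail

@[simp] lemma pvEv_nil : pvEv [] = [] := rfl
@[simp] lemma pvOd_nil : pvOd [] = [] := rfl
@[simp] lemma pvOd_cons (a : Int) (t : List Int) : pvOd (a :: t) = pvEv t := rfl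
@[simp] lemma pvEv_cons (a : Int) (t : List Int) : pvEv (a :: t) = a :: pvOd t := by
  cases t <;> rfl

lemma pvEv_ne_nil (l : List Int) (h : l ≠ []) : pvEv l ≠ [] := by
  cases l with
  | nil => exact absurd rfl h
  | cons a t => simp

def pvPos (x : Int) : Int := if 0 < x then x else 0

def pvPsum (xs : List Int) : Int := (xs.filter (fun x => decide (0 < x))).sum

@[simp] lemma pvPsum_nil : pvPsum [] = 0 := rfl
@[simp] lemma pvPsum_cons (x : Int) (t : List Int) :
    pvPsum (x :: t) = pvPos x + pvPsum t := by
  simp only [pvPsum, pvPos, List.filter_cons]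
  split_ifs with h <;> simp_all

lemma pvPsum_append (xs ys : List Int) : pvPsum (xs ++ ys) = pvPsum xs + pvPsum ys := by
  simp [pvPsum, List.filter_append]

lemma pvPos_nonneg (x : Int) : 0 ≤ pvPos x := by unfold pvPos; split <;> omega

lemma pvPsum_nonneg (xs : List Int) : 0 ≤ pvPsum xs := by
  induction xs with
  | nil => simp
  | cons x t ih => have := pvPos_nonneg x; simp; omega

-- the value B computes, phrased over pvEv/pvOd
def pvM (l : List Int) : Int :=
  if pvOd l = [] then pvBestB (pvEv l) else max (pvBestB (pvEv l)) (pvBestB (pvOd l))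

lemma pvBestB_eq (xs : List Int) :
    pvBestB xs = if 0 < pvPsum xs then pvPsum xs else (PySem.List.max? xs (fun y => y)).getD 0 := rfl

lemma le_pvBestB_of_mem {x : Int} {xs : List Int} (hx : x ∈ xs) : x ≤ pvBestB xs := by
  rw [pvBestB_eq]
  split_ifs with h
  · by_cases hx0 : 0 < x
    · refine List.single_le_sum ?_ x ?_
      · intro y hy
        have := List.of_mem_filter hy
        simp at this; omega
      · exact List.mem_filter.mpr ⟨hx, by simpa⟩
    · omega
  · cases hm : PySem.List.max? xs (fun y => y) with
    | none =>
      rw [PySem.List.max?_eq_none_iff] at hm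
      subst hm; cases hx
    | some m =>
      simpa using PySem.List.max?_isMax hm x hx

lemma pvBestB_le_of_sublist {xs ys : List Int} (hne : xs ≠ []) (hs : List.Sublist xs ys) :
    pvBestB xs ≤ pvBestB ys := by
  have hsum : pvPsum xs ≤ pvPsum ys := by
    refine List.Sublist.sum_le_sum (hs.filter _) ?_
    intro y hy
    have := List.of_mem_filter hy
    simp at this; omega
  rw [pvBestB_eq xs]
  split_ifs with h
  · rw [pvBestB_eq ys, if_pos (lt_of_lt_of_le h hsum)]; exact hsum
  · cases hm : PySem.List.max? xs (fun y => y) with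
    | none => rw [PySem.List.max?_eq_none_iff] at hm; exact absurd hm hne
    | some m =>
      have hmem : m ∈ xs := PySem.List.max?_mem hm
      simpa using le_pvBestB_of_mem (hs.subset hmem)

lemma pvBestB_merge_le (p s : List Int) (a c : Int) :
    pvBestB (p ++ (a + c) :: s) ≤ pvBestB (p ++ a :: c :: s) := by
  have hps : pvPsum (p ++ (a + c) :: s) ≤ pvPsum (p ++ a :: c :: s) := by
    simp only [pvPsum_append, pvPsum_cons]
    have h1 := pvPos_nonneg a; have h2 := pvPos_nonneg c
    have : pvPos (a + c) ≤ pvPos a + pvPos c := by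
      unfold pvPos; split_ifs <;> omega
    omega
  rw [pvBestB_eq (p ++ (a + c) :: s)]
  split_ifs with h
  · rw [pvBestB_eq (p ++ a :: c :: s), if_pos (lt_of_lt_of_le h hps)]; exact hps
  · cases hm : PySem.List.max? (p ++ (a + c) :: s) (fun y => y) with
    | none =>
      rw [PySem.List.max?_eq_none_iff] at hm
      simp at hm
    | some m =>
      have hmem : m ∈ p ++ (a + c) :: s := PySem.List.max?_mem hm
      simp only [Option.getD_some]
      rcases List.mem_append.mp hmem with hp | hcs
      · exact le_pvBestB_of_mem (by simp [hp])
      rcases List.mem_cons.mp hcs with rfl | hs'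
      · -- m = a + c and the positive-part sum is ≤ 0, hence a + c ≤ 0
        have hpa := pvPsum_nonneg p
        have hss := pvPsum_nonneg s
        have hac : pvPos (a + c) ≤ 0 := by
          have := pvPsum_append p ((a + c) :: s)
          simp only [pvPsum_cons] at this
          omega
        have hac' : a + c ≤ 0 := by
          unfold pvPos at hac; split_ifs at hac <;> omega
        have h1 : a ≤ pvBestB (p ++ a :: c :: s) := le_pvBestB_of_mem (by simp)
        have h2 : c ≤ pvBestB (p ++ a :: c :: s) := le_pvBestB_of_mem (by simp)
        omega
      · exact le_pvBestB_of_mem (by simp [hs'])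

lemma pvBestB_singleton (a : Int) : pvBestB [a] = a := by
  rw [pvBestB_eq]
  have : PySem.List.max? [a] (fun y => y) = some ([].foldl max a) := PySem.List.max?_id_cons a []
  simp only [pvPsum_cons, pvPsum_nil, add_zero, this, List.foldl_nil, Option.getD_some]
  unfold pvPos; split_ifs <;> omega

lemma bEv_le_pvM (l : List Int) : pvBestB (pvEv l) ≤ pvM l := by
  unfold pvM; split_ifs
  · exact le_refl _
  · exact le_max_left _ _

lemma bOd_le_pvM (l : List Int) (h : pvOd l ≠ []) : pvBestB (pvOd l) ≤ pvM l := by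
  unfold pvM; rw [if_neg h]; exact le_max_right _ _

lemma pvM_le {l : List Int} {x : Int}
    (hE : pvBestB (pvEv l) ≤ x) (hO : pvOd l ≠ [] → pvBestB (pvOd l) ≤ x) : pvM l ≤ x := by
  unfold pvM; split_ifs with h
  · exact hE
  · exact max_le hE (hO h)

lemma ev_subset {x : Int} : ∀ {l : List Int}, x ∈ pvEv l → x ∈ l
  | [], h => by simp at h
  | [a], h => by simpa using h
  | a :: b :: t, h => by
    rw [pvEv_cons, pvOd_cons] at h
    rcases List.mem_cons.mp h with rfl | h'
    · simp
    · exact List.mem_cons_of_mem _ (List.mem_cons_of_mem _ (ev_subset h'))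

lemma mem_ev_or_od {x : Int} {l : List Int} (hx : x ∈ l) : x ∈ pvEv l ∨ x ∈ pvOd l := by
  induction l with
  | nil => cases hx
  | cons a t ih =>
    rcases List.mem_cons.mp hx with rfl | ht
    · left; simp
    · rcases ih ht with h | h
      · right; simpa using h
      · left; rw [pvEv_cons]; exact List.mem_cons_of_mem _ h

lemma le_pvM_of_mem {x : Int} {l : List Int} (hx : x ∈ l) : x ≤ pvM l := by
  rcases mem_ev_or_od hx with h | h
  · exact le_trans (le_pvBestB_of_mem h) (bEv_le_pvM l)
  · exact le_trans (le_pvBestB_of_mem h) (bOd_le_pvM l (List.ne_nil_of_mem h))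

lemma ev_od_append (xs ys : List Int) :
    pvEv (xs ++ ys) = pvEv xs ++ (if 2 ∣ xs.length then pvEv ys else pvOd ys) ∧
    pvOd (xs ++ ys) = pvOd xs ++ (if 2 ∣ xs.length then pvOd ys else pvEv ys) := by
  induction xs with
  | nil => simp
  | cons a t ih =>
    have hswap : ∀ (u v : List Int), (if 2 ∣ t.length then u else v)
        = (if 2 ∣ (a :: t).length then v else u) := by
      intro u v
      simp only [List.length_cons]
      by_cases h2 : 2 ∣ t.length
      · rw [if_pos h2, if_neg (by omega)]
      · rw [if_neg h2, if_pos (by omega)]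
    constructor
    · simp only [List.cons_append, pvEv_cons, ih.2]
      rw [hswap]
    · simp only [List.cons_append, pvOd_cons, ih.1]
      rw [hswap]

-- B's port computes pvM (the enumerate/filter comprehensions are pvEv/pvOd)
def pvEnumCls (l : List Int) (s : Int) (k : Int) : List Int :=
  ((PySem.List.enumerate l s).filter (fun p => PySem.Int.mod p.1 2 == k)).map Prod.snd

lemma enum_cls (l : List Int) : ∀ s : Int, 0 ≤ s →
    (s % 2 = 0 → pvEnumCls l s 0 = pvEv l ∧ pvEnumCls l s 1 = pvOd l) ∧
    (s % 2 = 1 → pvEnumCls l s 0 = pvOd l ∧ pvEnumCls l s 1 = pvEv l) := by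
  induction l with
  | nil =>
    intro s _
    simp [pvEnumCls, PySem.List.enumerate_nil]
  | cons a t ih =>
    intro s hs
    have hmodeq : PySem.Int.mod s 2 = s % 2 := PySem.Int.mod_eq_emod_of_pos (by norm_num)
    have ih1 := ih (s + 1) (by omega)
    constructor
    · intro h0
      have hb0 : (PySem.Int.mod s 2 == 0) = true := by rw [hmodeq]; simpa using h0
      have hb1 : (PySem.Int.mod s 2 == 1) = false := by
        rw [hmodeq]; simp only [beq_eq_false_iff_ne, ne_eq]; omega
      have hnext := ih1.2 (by omega)
      constructor
      · simp only [pvEnumCls, PySem.List.enumerate_cons, List.filter_cons] at *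
        simp only [hb0, if_true, List.map_cons, pvEv_cons]
        exact congrArg _ hnext.1
      · simp only [pvEnumCls, PySem.List.enumerate_cons, List.filter_cons] at *
        simp only [hb1, pvOd_cons]
        exact hnext.2
    · intro h1'
      have hb0 : (PySem.Int.mod s 2 == 0) = false := by
        rw [hmodeq]; simp only [beq_eq_false_iff_ne, ne_eq]; omega
      have hb1 : (PySem.Int.mod s 2 == 1) = true := by rw [hmodeq]; simpa using h1'
      have hnext := ih1.1 (by omega)
      constructor
      · simp only [pvEnumCls, PySem.List.enumerate_cons, List.filter_cons] at *
        simp only [hb0, pvOd_cons]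
        exact hnext.1
      · simp only [pvEnumCls, PySem.List.enumerate_cons, List.filter_cons] at *
        simp only [hb1, if_true, List.map_cons, pvEv_cons]
        exact congrArg _ hnext.2

lemma alt_eq_pvM (l : List Int) : get_maximum_charge_alt l = pvM l := by
  have h := (enum_cls l 0 (le_refl 0)).1 (by norm_num)
  have halt : get_maximum_charge_alt l =
      if pvEnumCls l 0 1 = [] then pvBestB (pvEnumCls l 0 0)
      else max (pvBestB (pvEnumCls l 0 0)) (pvBestB (pvEnumCls l 0 1)) := rfl
  rw [halt, h.1, h.2]
  rfl

-- fold-max facts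
lemma pvMaxFold_aux (cs : List Int) : ∀ a : Int,
    cs.foldl (fun acc r => some (acc.elim r (fun a => max a r))) (some a) = some (cs.foldl max a) := by
  induction cs with
  | nil => intro a; rfl
  | cons c t ih => intro a; simpa using ih (max a c)

lemma pvMaxFold_cons (c : Int) (cs : List Int) : pvMaxFold (c :: cs) = some (cs.foldl max c) := by
  unfold pvMaxFold
  simpa using pvMaxFold_aux cs c

lemma le_pvMaxFold {c : Int} {cs : List Int} (h : c ∈ cs) : c ≤ (pvMaxFold cs).getD 0 := by
  cases cs with
  | nil => cases h
  | cons c0 t =>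
    rw [pvMaxFold_cons, Option.getD_some]
    rcases List.mem_cons.mp h with rfl | ht
    · exact (PySem.List.le_foldl_max t c).1
    · exact (PySem.List.le_foldl_max t c0).2 c ht

lemma pvMaxFold_le {cs : List Int} {x : Int} (hne : cs ≠ []) (h : ∀ c ∈ cs, c ≤ x) :
    (pvMaxFold cs).getD 0 ≤ x := by
  cases cs with
  | nil => exact absurd rfl hne
  | cons c0 t =>
    rw [pvMaxFold_cons, Option.getD_some]
    rcases PySem.List.foldl_max_mem t c0 with he | hm
    · rw [he]; exact h c0 (by simp)
    · exact h _ (List.mem_cons_of_mem _ hm)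

-- unfolding of port A
lemma simA_singleton (a : Int) : get_maximum_charge [a] = a := by
  rw [get_maximum_charge]; simp

lemma simA_eq {l : List Int} (h : l.length ≠ 1) :
    get_maximum_charge l =
      (pvMaxFold ((List.range l.length).map (fun i => get_maximum_charge (pvStep l i)))).getD 0 := by
  rw [get_maximum_charge, if_neg h]
  rw [List.attach_map_val (l := List.range l.length)
    (f := fun i => get_maximum_charge (pvStep l i))]

-- shapes of pvStep
lemma pvStep_zero (l : List Int) : pvStep l 0 = l.drop 1 := by simp [pvStep]

lemma pvStep_last (l : List Int) (h2 : 2 ≤ l.length) :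
    pvStep l (l.length - 1) = l.take (l.length - 1) := by
  unfold pvStep
  rw [if_neg (by omega), if_neg (by omega)]

lemma pvStep_one (a b c : Int) (r : List Int) : pvStep (a :: b :: c :: r) 1 = (a + c) :: r := by
  unfold pvStep
  rw [if_pos ⟨by omega, by simp only [List.length_cons]; omega⟩]
  simp

lemma pvStep_two (a b c d : Int) (r : List Int) :
    pvStep (a :: b :: c :: d :: r) 2 = a :: (b + d) :: r := by
  unfold pvStep
  rw [if_pos ⟨by omega, by simp only [List.length_cons]; omega⟩]
  simp

lemma pvStep_mid (l : List Int) (i : Nat) (h1 : 0 < i) (h2 : i < l.length - 1) :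
    pvStep l i = l.take (i-1) ++ ((l[i-1]?).getD 0 + (l[i+1]?).getD 0) :: l.drop (i+2) := by
  unfold pvStep
  rw [if_pos ⟨h1, h2⟩]

lemma pvStep_length (l : List Int) (i : Nat) (h2 : 2 ≤ l.length) (hi : i < l.length) :
    0 < (pvStep l i).length := by
  unfold pvStep; split_ifs <;> simp <;> omega

-- each move can only shrink pvM
lemma step_pvM_le (l : List Int) (i : Nat) (h2 : 2 ≤ l.length) (hi : i < l.length) :
    pvM (pvStep l i) ≤ pvM l := by
  by_cases h0 : i = 0
  · -- drop the head: the classes swap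
    subst h0
    rw [pvStep_zero]
    obtain ⟨a, t, rfl⟩ : ∃ a t, l = a :: t := by
      cases l with
      | nil => simp at h2
      | cons a t => exact ⟨a, t, rfl⟩
    have ht : t ≠ [] := by cases t <;> simp_all
    simp only [List.drop_one, List.tail_cons]
    refine pvM_le ?_ ?_
    · -- pvEv t = pvOd (a :: t)
      have : pvEv t = pvOd (a :: t) := rfl
      rw [this]
      exact bOd_le_pvM _ (by rw [← this]; exact pvEv_ne_nil t ht)
    · intro hOt
      have hsub : List.Sublist (pvOd t) (pvEv (a :: t)) := by
        rw [pvEv_cons]; exact List.sublist_cons_self _ _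
      exact le_trans (pvBestB_le_of_sublist hOt hsub) (bEv_le_pvM _)
  · by_cases hlast : i = l.length - 1
    · -- drop the last element: each class is a prefix of the old one
      subst hlast
      rw [pvStep_last l h2]
      have hne : l ≠ [] := by cases l <;> simp_all
      have hdec := List.dropLast_concat_getLast hne
      rw [← List.dropLast_eq_take]
      have happ := ev_od_append l.dropLast [l.getLast hne]
      have hEsub : List.Sublist (pvEv l.dropLast) (pvEv l) := by
        conv_rhs => rw [← hdec]
        rw [happ.1]; exact List.sublist_append_left _ _
      have hOsub : List.Sublist (pvOd l.dropLast) (pvOd l) := by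
        conv_rhs => rw [← hdec]
        rw [happ.2]; exact List.sublist_append_left _ _
      have hDne : l.dropLast ≠ [] := by
        have : l.dropLast.length = l.length - 1 := List.length_dropLast
        intro hc; rw [hc] at this; simp at this; omega
      refine pvM_le ?_ ?_
      · exact le_trans (pvBestB_le_of_sublist (pvEv_ne_nil _ hDne) hEsub) (bEv_le_pvM l)
      · intro hOt
        have hOl : pvOd l ≠ [] := by
          intro hc; rw [hc] at hOsub; exact hOt (List.sublist_nil.mp hOsub)
        exact le_trans (pvBestB_le_of_sublist hOt hOsub) (bOd_le_pvM l hOl)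
    · -- interior merge
      have h1 : 0 < i := by omega
      have hmid : i < l.length - 1 := by omega
      have hi1 : i - 1 < l.length := by omega
      have hi2 : i + 1 < l.length := by omega
      set p := l.take (i-1) with hp
      set a := l[i-1] with ha
      set b := l[i]'(by omega) with hb
      set c := l[i+1] with hc
      set r := l.drop (i+2) with hr
      have hldec : l = p ++ a :: b :: c :: r := by
        have e1 : l.drop (i-1) = a :: l.drop (i-1+1) := List.drop_eq_getElem_cons hi1
        have e2 : l.drop i = b :: l.drop (i+1) := List.drop_eq_getElem_cons (by omega)
        have e3 : l.drop (i+1) = c :: l.drop (i+2) := List.drop_eq_getElem_cons hi2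
        have : i - 1 + 1 = i := by omega
        rw [this] at e1
        conv_lhs => rw [← List.take_append_drop (i-1) l]
        rw [e1, e2, e3]
      have hstep : pvStep l i = p ++ (a + c) :: r := by
        rw [pvStep_mid l i h1 hmid, List.getElem?_eq_getElem hi1, List.getElem?_eq_getElem hi2]
        simp only [Option.getD_some]
        rfl
      have hplen : p.length = i - 1 := by
        rw [hp, List.length_take]; omega
      have happL := ev_od_append p ((a + c) :: r)
      have happR := ev_od_append p (a :: b :: c :: r)
      have hevR : pvEv (a :: b :: c :: r) = a :: c :: pvOd r := by simp
      have hodR : pvOd (a :: b :: c :: r) = b :: pvEv r := by simp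
      have hevL : pvEv ((a + c) :: r) = (a + c) :: pvOd r := by simp
      have hodL : pvOd ((a + c) :: r) = pvEv r := by simp
      rw [hstep]
      by_cases hpar : 2 ∣ p.length
      · -- merged element lands in the even class
        have hEl : pvEv l = pvEv p ++ a :: c :: pvOd r := by
          conv_lhs => rw [hldec]
          rw [happR.1, if_pos hpar, hevR]
        have hOl : pvOd l = pvOd p ++ b :: pvEv r := by
          conv_lhs => rw [hldec]
          rw [happR.2, if_pos hpar, hodR]
        have hEs : pvEv (p ++ (a + c) :: r) = pvEv p ++ (a + c) :: pvOd r := by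
          rw [happL.1, if_pos hpar, hevL]
        have hOs : pvOd (p ++ (a + c) :: r) = pvOd p ++ pvEv r := by
          rw [happL.2, if_pos hpar, hodL]
        refine pvM_le ?_ ?_
        · rw [hEs]
          calc pvBestB (pvEv p ++ (a + c) :: pvOd r)
              ≤ pvBestB (pvEv p ++ a :: c :: pvOd r) := pvBestB_merge_le _ _ a c
            _ ≤ pvM l := by rw [← hEl]; exact bEv_le_pvM l
        · intro hOt
          rw [hOs] at hOt ⊢
          have hsub : List.Sublist (pvOd p ++ pvEv r) (pvOd p ++ b :: pvEv r) :=
            (List.append_sublist_append_left _).mpr (List.sublist_cons_self _ _)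
          calc pvBestB (pvOd p ++ pvEv r)
              ≤ pvBestB (pvOd p ++ b :: pvEv r) := pvBestB_le_of_sublist hOt hsub
            _ ≤ pvM l := by rw [← hOl]; exact bOd_le_pvM l (by rw [hOl]; simp)
      · -- merged element lands in the odd class
        have hEl : pvEv l = pvEv p ++ b :: pvEv r := by
          conv_lhs => rw [hldec]
          rw [happR.1, if_neg hpar, hodR]
        have hOl : pvOd l = pvOd p ++ a :: c :: pvOd r := by
          conv_lhs => rw [hldec]
          rw [happR.2, if_neg hpar, hevR]
        have hEs : pvEv (p ++ (a + c) :: r) = pvEv p ++ pvEv r := by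
          rw [happL.1, if_neg hpar, hodL]
        have hOs : pvOd (p ++ (a + c) :: r) = pvOd p ++ (a + c) :: pvOd r := by
          rw [happL.2, if_neg hpar, hevL]
        have hpne : p ≠ [] := by
          intro hcc
          apply hpar
          rw [hcc]
          simp
        refine pvM_le ?_ ?_
        · rw [hEs]
          have hsub : List.Sublist (pvEv p ++ pvEv r) (pvEv p ++ b :: pvEv r) :=
            (List.append_sublist_append_left _).mpr (List.sublist_cons_self _ _)
          have hne : pvEv p ++ pvEv r ≠ [] := by
            simp [pvEv_ne_nil p hpne]
          calc pvBestB (pvEv p ++ pvEv r)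
              ≤ pvBestB (pvEv p ++ b :: pvEv r) := pvBestB_le_of_sublist hne hsub
            _ ≤ pvM l := by rw [← hEl]; exact bEv_le_pvM l
        · intro hOt
          rw [hOs] at hOt ⊢
          calc pvBestB (pvOd p ++ (a + c) :: pvOd r)
              ≤ pvBestB (pvOd p ++ a :: c :: pvOd r) := pvBestB_merge_le _ _ a c
            _ ≤ pvM l := by rw [← hOl]; exact bOd_le_pvM l (by rw [hOl]; simp)

-- some move attains pvM
lemma pvM_le_simA (l : List Int) (h2 : 2 ≤ l.length)
    (hstep : ∀ i, i < l.length → get_maximum_charge (pvStep l i) = pvM (pvStep l i)) :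
    pvM l ≤ get_maximum_charge l := by
  rw [simA_eq (by omega)]
  have hcand : ∀ i, i < l.length → pvM (pvStep l i) ≤ (pvMaxFold ((List.range l.length).map
      (fun i => get_maximum_charge (pvStep l i)))).getD 0 := by
    intro i hi
    rw [← hstep i hi]
    exact le_pvMaxFold (List.mem_map.mpr ⟨i, List.mem_range.mpr hi, rfl⟩)
  obtain ⟨a, t, rfl⟩ : ∃ a t, l = a :: t := by
    cases l with
    | nil => simp at h2
    | cons a t => exact ⟨a, t, rfl⟩
  have ht : t ≠ [] := by cases t <;> simp_all
  refine pvM_le ?_ ?_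
  · -- the even class's best is attained
    by_cases hp : 0 < pvPsum (pvEv (a :: t))
    · -- positive part: a single move keeps the positive-part sum of the even class
      by_cases hA : a ≤ 0
      · -- drop the head: pvOd of the tail is pvEv minus its head, same positive sum
        have hcand0 := hcand 0 (by omega)
        rw [pvStep_zero] at hcand0
        simp only [List.drop_one, List.tail_cons] at hcand0
        have hps : pvPsum (pvOd t) = pvPsum (pvEv (a :: t)) := by
          rw [pvEv_cons, pvPsum_cons]
          have : pvPos a = 0 := by unfold pvPos; split_ifs <;> omega
          omega
        have hOtne : pvOd t ≠ [] := by
          intro hc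
          rw [hc] at hps
          simp only [pvPsum_nil] at hps
          omega
        have hbev : pvBestB (pvEv (a :: t)) = pvPsum (pvEv (a :: t)) := by
          rw [pvBestB_eq, if_pos hp]
        have hbod : pvBestB (pvOd t) = pvPsum (pvOd t) := by
          rw [pvBestB_eq, if_pos (by omega)]
        calc pvBestB (pvEv (a :: t)) = pvBestB (pvOd t) := by rw [hbev, hbod, hps]
          _ ≤ pvM t := bOd_le_pvM t hOtne
          _ ≤ _ := hcand0
      · -- head positive
        rw [not_le] at hA
        match t with
        | [] => exact absurd rfl ht
        | [b] =>
          -- length 2: drop the last element, the even class is unchanged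
          have hcand1 := hcand 1 (by simp)
          have : pvStep [a, b] 1 = [a] := by
            unfold pvStep; norm_num
          rw [this] at hcand1
          have : pvEv [a, b] = [a] := by simp
          rw [this]
          calc pvBestB [a] ≤ pvM [a] := bEv_le_pvM [a]
            _ ≤ _ := hcand1
        | b :: c :: r =>
          by_cases hC : 0 < c
          · -- merge the first two even elements (both positive)
            have hcand1 := hcand 1 (by simp only [List.length_cons]; omega)
            rw [pvStep_one] at hcand1
            have hps : pvPsum (pvEv ((a + c) :: r)) = pvPsum (pvEv (a :: b :: c :: r)) := by
              simp only [pvEv_cons, pvOd_cons, pvPsum_cons]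
              have : pvPos (a + c) = pvPos a + pvPos c := by
                unfold pvPos; split_ifs <;> omega
              rw [this]; ring
            have hbL : pvBestB (pvEv ((a + c) :: r)) = pvPsum (pvEv ((a + c) :: r)) := by
              rw [pvBestB_eq, if_pos (by omega)]
            have hbR : pvBestB (pvEv (a :: b :: c :: r)) = pvPsum (pvEv (a :: b :: c :: r)) := by
              rw [pvBestB_eq, if_pos hp]
            calc pvBestB (pvEv (a :: b :: c :: r))
                = pvBestB (pvEv ((a + c) :: r)) := by rw [hbL, hbR, hps]
              _ ≤ pvM ((a + c) :: r) := bEv_le_pvM _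
              _ ≤ _ := hcand1
          · -- second even element nonpositive: remove it
            match r with
            | [] =>
              -- length 3: drop the last element
              have hcand2 := hcand 2 (by simp)
              have hst : pvStep [a, b, c] 2 = [a, b] := by
                unfold pvStep; norm_num
              rw [hst] at hcand2
              have hps : pvPsum (pvEv [a, b]) = pvPsum (pvEv [a, b, c]) := by
                simp only [pvEv_cons, pvOd_cons, pvEv_nil, pvOd_nil, pvPsum_cons, pvPsum_nil]
                have : pvPos c = 0 := by unfold pvPos; split_ifs <;> omega
                simp [this]
              have hbL : pvBestB (pvEv [a, b]) = pvPsum (pvEv [a, b]) := by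
                rw [pvBestB_eq, if_pos (by omega)]
              have hbR : pvBestB (pvEv [a, b, c]) = pvPsum (pvEv [a, b, c]) := by
                rw [pvBestB_eq, if_pos hp]
              calc pvBestB (pvEv [a, b, c]) = pvBestB (pvEv [a, b]) := by rw [hbL, hbR, hps]
                _ ≤ pvM [a, b] := bEv_le_pvM _
                _ ≤ _ := hcand2
            | d :: r' =>
              -- merge b with d, removing the nonpositive c
              have hcand2 := hcand 2 (by simp)
              rw [pvStep_two] at hcand2
              have hps : pvPsum (pvEv (a :: (b + d) :: r'))
                  = pvPsum (pvEv (a :: b :: c :: d :: r')) := by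
                simp only [pvEv_cons, pvOd_cons, pvPsum_cons]
                have : pvPos c = 0 := by unfold pvPos; split_ifs <;> omega
                rw [this]; ring
              have hbL : pvBestB (pvEv (a :: (b + d) :: r'))
                  = pvPsum (pvEv (a :: (b + d) :: r')) := by
                rw [pvBestB_eq, if_pos (by omega)]
              have hbR : pvBestB (pvEv (a :: b :: c :: d :: r'))
                  = pvPsum (pvEv (a :: b :: c :: d :: r')) := by
                rw [pvBestB_eq, if_pos hp]
              calc pvBestB (pvEv (a :: b :: c :: d :: r'))
                  = pvBestB (pvEv (a :: (b + d) :: r')) := by rw [hbL, hbR, hps]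
                _ ≤ pvM (a :: (b + d) :: r') := bEv_le_pvM _
                _ ≤ _ := hcand2
    · -- no positive element: the best is one element, kept by dropping an end
      rw [pvBestB_eq, if_neg hp]
      cases hm : PySem.List.max? (pvEv (a :: t)) (fun y => y) with
      | none =>
        rw [PySem.List.max?_eq_none_iff] at hm
        exact absurd hm (pvEv_ne_nil _ (by simp))
      | some m =>
        rw [Option.getD_some]
        have hmem : m ∈ pvEv (a :: t) := PySem.List.max?_mem hm
        have hmem' : m ∈ a :: t := ev_subset hmem
        rcases List.mem_cons.mp hmem' with hma | hmt
        · -- m is the head: drop the last element instead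
          have hlast := hcand ((a :: t).length - 1) (by simp)
          rw [pvStep_last _ h2] at hlast
          have hmem2 : m ∈ (a :: t).take ((a :: t).length - 1) := by
            rw [hma]
            cases t with
            | nil => exact absurd rfl ht
            | cons b t' => simp
          exact le_trans (le_pvM_of_mem hmem2) hlast
        · -- m is in the tail: drop the head
          have hcand0 := hcand 0 (by omega)
          rw [pvStep_zero] at hcand0
          simp only [List.drop_one, List.tail_cons] at hcand0
          exact le_trans (le_pvM_of_mem hmt) hcand0
  · -- the odd class's best: drop the head, it becomes the new even class
    intro hOl
    have hcand0 := hcand 0 (by omega)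
    rw [pvStep_zero] at hcand0
    simp only [List.drop_one, List.tail_cons] at hcand0
    have : pvOd (a :: t) = pvEv t := rfl
    rw [this]
    exact le_trans (bEv_le_pvM t) hcand0

-- the main induction: A computes pvM on every nonempty list
lemma simA_eq_pvM : ∀ (n : Nat) (l : List Int), l.length = n → l ≠ [] → get_maximum_charge l = pvM l := by
  intro n
  induction n using Nat.strong_induction_on with
  | _ n IH =>
    intro l hlen hne
    by_cases h1 : l.length = 1
    · obtain ⟨a, rfl⟩ : ∃ a, l = [a] := by
        cases l with
        | nil => simp at h1
        | cons a t => cases t with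
          | nil => exact ⟨a, rfl⟩
          | cons b t' => simp at h1
      rw [simA_singleton]
      unfold pvM
      rw [if_pos (show pvOd [a] = [] from rfl), show pvEv [a] = [a] from rfl, pvBestB_singleton]
    · have h2 : 2 ≤ l.length := by
        cases l with
        | nil => exact absurd rfl hne
        | cons a t => simp only [List.length_cons] at h1 ⊢; omega
      have hstep : ∀ i, i < l.length → get_maximum_charge (pvStep l i) = pvM (pvStep l i) := by
        intro i hi
        have hlt := pvStep_length_lt l i h2 hi
        have hpos := pvStep_length l i h2 hi
        exact IH (pvStep l i).length (by omega) _ rfl (by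
          intro hc; rw [hc] at hpos; simp at hpos)
      refine le_antisymm ?_ (pvM_le_simA l h2 hstep)
      rw [simA_eq h1]
      refine pvMaxFold_le (by simp; omega) ?_
      intro cnd hc
      obtain ⟨i, hi, rfl⟩ := List.mem_map.mp hc
      rw [List.mem_range] at hi
      rw [hstep i hi]
      exact step_pvM_le l i h2 hi

-- ===== VERDICT (by name: the statement is the Claim_ definition above) =====
theorem get_maximum_charge_spec : Claim_equal_get_maximum_charge := by
  intro charge _ hpre
  unfold Spec_get_maximum_charge
  rw [alt_eq_pvM]
  exact simA_eq_pvM charge.length charge rfl hpre
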